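-- pv_equiv track=rewrite | github.com/hakataramen/word2vec | read.py | w2v_to_idx
-- ===== SOURCE A (Python) =====
-- from collections import OrderedDict
--
-- def w2v_to_idx(wordlist, veclist):
--     idx_dic=OrderedDict()
--     i = len(idx_dic)+1
--     for word, vec in zip(wordlist, veclist):
--         if word not in idx_dic:
--             idx_dic[word]=i
--             i+=1
--
--     return (idx_dic, i)
-- ===== SOURCE B (Python) =====
-- from collections import OrderedDict
--
-- def w2v_to_idx(wordlist, veclist):
--     # Two-phase: collect truncated word stream, dedup preserving order, then index.
--     words = [w for w, _ in zip(wordlist, veclist)]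
--     unique = dict.fromkeys(words)
--     idx_dic = OrderedDict((w, i) for i, w in enumerate(unique, start=1))
--     return (idx_dic, len(idx_dic) + 1)
-- ===== Notes on version B (the rewrite author's own statement) =====
-- stated objective: idiomatic
-- what changed: Replaces the single accumulating pass with an inline membership test and hand-maintained counter by a two-phase pipeline: dedup the zipped word stream with dict.fromkeys, then build the index dict by enumerate(start=1); the counter and the 'not in' branch disappear.
import Mathlib
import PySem

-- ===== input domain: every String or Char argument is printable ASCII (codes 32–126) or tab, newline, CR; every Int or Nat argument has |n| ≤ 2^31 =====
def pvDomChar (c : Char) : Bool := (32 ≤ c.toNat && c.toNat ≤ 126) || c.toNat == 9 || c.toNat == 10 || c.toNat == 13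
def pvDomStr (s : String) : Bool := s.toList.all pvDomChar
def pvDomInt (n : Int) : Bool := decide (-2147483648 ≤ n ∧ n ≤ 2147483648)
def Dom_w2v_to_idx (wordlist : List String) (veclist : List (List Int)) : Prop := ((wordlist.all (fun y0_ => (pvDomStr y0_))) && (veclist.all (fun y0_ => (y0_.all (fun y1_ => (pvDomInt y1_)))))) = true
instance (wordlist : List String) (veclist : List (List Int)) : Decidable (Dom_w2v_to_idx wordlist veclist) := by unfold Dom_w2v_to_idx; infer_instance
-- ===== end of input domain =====

-- B replaces A's single accumulating pass (membership test + hand-kept counter) by a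
-- dedup-then-enumerate two-phase pipeline; same O(n) cost, more idiomatic.


-- ===== PORT A =====
-- idx_dic = OrderedDict(); i = len(idx_dic)+1; for word, vec in zip(...): if word not in idx_dic: idx_dic[word] = i; i += 1
def w2v_to_idx (wordlist : List String) (veclist : List (List Int)) : (List (String × Int)) × Int :=
  let st :=
    (wordlist.zip veclist).foldl
      (fun (st : PySem.Dict String Int × Int) wv =>
        if st.1.contains wv.1 = false then (st.1.insert wv.1 st.2, st.2 + 1) else st)
      ((PySem.Dict.empty : PySem.Dict String Int),
       ((PySem.Dict.empty : PySem.Dict String Int).size : Int) + 1)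
  (st.1.items, st.2)

-- ===== PORT B =====
-- words = [w for w, _ in zip(...)]; unique = dict.fromkeys(words); idx_dic = OrderedDict((w, i) for i, w in enumerate(unique, 1))
def w2v_to_idx_alt (wordlist : List String) (veclist : List (List Int)) : (List (String × Int)) × Int :=
  let words := (wordlist.zip veclist).map (fun wv => wv.1)
  let unique := PySem.List.dedup words
  let idx_dic :=
    PySem.Dict.ofList ((PySem.List.enumerate unique 1).map (fun p => (p.2, p.1)))
  (idx_dic.items, (idx_dic.size : Int) + 1)

-- ===== PRECONDITION & SPEC =====
def Spec_w2v_to_idx (wordlist : List String) (veclist : List (List Int)) (out : (List (String × Int)) × Int) : Prop := out = w2v_to_idx_alt wordlist veclist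
instance (wordlist : List String) (veclist : List (List Int)) (out : (List (String × Int)) × Int) : Decidable (Spec_w2v_to_idx wordlist veclist out) := by unfold Spec_w2v_to_idx; infer_instance

-- ===== CLAIM (what is proved, stated in full; the proofs are below) =====
def Claim_equal_w2v_to_idx : Prop := ∀ (wordlist : List String) (veclist : List (List Int)), Dom_w2v_to_idx wordlist veclist → Spec_w2v_to_idx wordlist veclist (w2v_to_idx wordlist veclist)

-- ===== LEMMAS AND PROOFS =====

-- pvTag i [w0, w1, …] = [(w0, i), (w1, i+1), …]: the index pairs both programs build.
def pvTag (i : Int) : List String → List (String × Int)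
  | [] => []
  | w :: ws => (w, i) :: pvTag (i + 1) ws

theorem pvTag_length (i : Int) (s : List String) : (pvTag i s).length = s.length := by
  induction s generalizing i with
  | nil => rfl
  | cons w ws ih => simp [pvTag, ih]

theorem pvTag_append (i : Int) (s : List String) (w : String) :
    pvTag i (s ++ [w]) = pvTag i s ++ [(w, i + s.length)] := by
  induction s generalizing i with
  | nil => simp [pvTag]
  | cons x xs ih =>
    simp only [List.cons_append, pvTag, ih, List.length_cons, List.cons.injEq,
      List.append_cancel_left_eq, Prod.mk.injEq, true_and]
    refine ⟨?_, trivial⟩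
    push_cast
    ring

theorem pvTag_eq_enumerate_swap (i : Int) (s : List String) :
    (PySem.List.enumerate s i).map (fun p => (p.2, p.1)) = pvTag i s := by
  induction s generalizing i with
  | nil => rfl
  | cons w ws ih => simp [PySem.List.enumerate_cons, pvTag, ih]

theorem contains_mk_pvTag (i : Int) (s : List String) (w : String) :
    (PySem.Dict.mk (pvTag i s)).contains w = s.contains w := by
  induction s generalizing i with
  | nil => rfl
  | cons x xs ih =>
    have := ih (i + 1)
    simp only [PySem.Dict.contains] at this ⊢
    simp only [pvTag, List.any_cons, List.contains_cons, this]
    simp [Bool.beq_comm]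

-- A's loop invariant: the dict always holds pvTag 1 s for the list s of seen words
-- (in first-occurrence order), and the counter is |s| + 1.
theorem loopA (ws : List String) : ∀ (s : List String),
    ws.foldl
      (fun (st : PySem.Dict String Int × Int) w =>
        if st.1.contains w = false then (st.1.insert w st.2, st.2 + 1) else st)
      (PySem.Dict.mk (pvTag 1 s), (s.length : Int) + 1)
    = (PySem.Dict.mk (pvTag 1 (PySem.Set.update s ws)),
       ((PySem.Set.update s ws).length : Int) + 1) := by
  induction ws with
  | nil => intro s; simp [PySem.Set.update]
  | cons w ws ih =>
    intro s
    have hupd : PySem.Set.update s (w :: ws) = PySem.Set.update (PySem.Set.add s w) ws := by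
      simp [PySem.Set.update]
    by_cases hw : w ∈ s
    · have hmem : s.contains w = true := by simpa using hw
      have hadd : PySem.Set.add s w = s := by simp [PySem.Set.add, PySem.Set.contains, hw]
      simp only [List.foldl_cons, contains_mk_pvTag, hmem, hupd, hadd]
      simpa using ih s
    · have hmem : s.contains w = false := by simpa using hw
      have hadd : PySem.Set.add s w = s ++ [w] := by
        simp [PySem.Set.add, PySem.Set.contains, hw]
      have hins : (PySem.Dict.mk (pvTag 1 s)).insert w ((s.length : Int) + 1)
          = PySem.Dict.mk (pvTag 1 (s ++ [w])) := by
        rw [PySem.Dict.insert, contains_mk_pvTag]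
        simp [hw, pvTag_append, add_comm]
      have hlen : (((s ++ [w]).length : Int)) + 1 = (s.length : Int) + 1 + 1 := by
        simp
      simp only [List.foldl_cons, contains_mk_pvTag, hmem, hupd, hadd, hins]
      rw [← hlen]
      simpa using ih (s ++ [w])

theorem altB_items (words : List String) :
    (PySem.Dict.ofList ((PySem.List.enumerate (PySem.Set.ofList words) 1).map
        (fun p => (p.2, p.1)))).items
    = pvTag 1 (PySem.Set.ofList words) := by
  rw [← pvTag_eq_enumerate_swap]
  show (PySem.Dict.update PySem.Dict.empty _).items = _
  rw [PySem.Dict.update, List.foldl_map]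
  have := PySem.Dict.items_foldl_insert_fresh
    (PySem.List.enumerate (PySem.Set.ofList words) 1)
    (fun p => p.2) (fun p => p.1) (PySem.Dict.empty)
    (by intro a _; rfl)
    (by rw [PySem.List.map_snd_enumerate]; exact PySem.Set.nodup_ofList words)
  simpa [PySem.Dict.empty] using this

theorem altB (wordlist : List String) (veclist : List (List Int)) :
    w2v_to_idx_alt wordlist veclist
    = (pvTag 1 (PySem.Set.ofList ((wordlist.zip veclist).map (fun wv => wv.1))),
       ((PySem.Set.ofList ((wordlist.zip veclist).map (fun wv => wv.1))).length : Int) + 1) := by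
  simp only [w2v_to_idx_alt, PySem.List.dedup, altB_items, PySem.Dict.size, pvTag_length]

-- ===== VERDICT (by name: the statement is the Claim_ definition above) =====
theorem w2v_to_idx_spec : Claim_equal_w2v_to_idx := by
  intro wordlist veclist _
  unfold Spec_w2v_to_idx
  unfold w2v_to_idx
  rw [altB]
  have h0 : ((PySem.Dict.empty : PySem.Dict String Int),
      ((PySem.Dict.empty : PySem.Dict String Int).size : Int) + 1)
      = (PySem.Dict.mk (pvTag 1 ([] : List String)), (([] : List String).length : Int) + 1) := rfl
  have hzip : (wordlist.zip veclist).foldl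
      (fun (st : PySem.Dict String Int × Int) wv =>
        if st.1.contains wv.1 = false then (st.1.insert wv.1 st.2, st.2 + 1) else st)
      (PySem.Dict.mk (pvTag 1 ([] : List String)), (([] : List String).length : Int) + 1)
      = ((wordlist.zip veclist).map (fun wv => wv.1)).foldl
      (fun (st : PySem.Dict String Int × Int) w =>
        if st.1.contains w = false then (st.1.insert w st.2, st.2 + 1) else st)
      (PySem.Dict.mk (pvTag 1 ([] : List String)), (([] : List String).length : Int) + 1) := by
    rw [List.foldl_map]
  simp only [h0, hzip, loopA, PySem.Set.update_nil_left]
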